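-- pv_equiv track=rewrite | github.com/nasa/opera-sds-pcm | data_subscriber/disp_static/disp_static_query.py | reduce_rtc_bursts_to_cmr_patterns
-- ===== SOURCE A (Python) =====
-- from collections import defaultdict
--
-- def reduce_rtc_bursts_to_cmr_patterns(rtc_native_id_patterns_burst_sets):
--     native_id_pattern_tree = tree()
--     for pattern in rtc_native_id_patterns_burst_sets:
--         native_id_pattern_tree[pattern[:-7]][pattern[:-6]][pattern[:-5]][pattern[:-4]][pattern]
--     native_id_pattern_tree = dicts(native_id_pattern_tree)
--
--     rtc_native_id_patterns = set()
--     for k1, v1 in native_id_pattern_tree.items():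
--         if len(v1.keys()) == 10:
--             rtc_native_id_patterns.add(k1)
--         else:
--             for k2, v2 in v1.items():
--                 if len(v2.keys()) == 10:
--                     rtc_native_id_patterns.add(k2)
--                 else:
--                     for k3, v3 in v2.items():
--                         if len(v3.keys()) == 10:
--                             rtc_native_id_patterns.add(k3)
--                         else:
--                             for k4, v4 in v3.items():
--                                 if len(v4.keys()) == 3:  # got to the list of full native-ids
--                                     rtc_native_id_patterns.add(k4)
--                                 else:
--                                     rtc_native_id_patterns.update(set(v4.keys()))  # all the individual beams (1/3 or 2/3)
--     rtc_native_id_patterns = {p + "*" for p in rtc_native_id_patterns}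
--
--     return rtc_native_id_patterns
--
-- def tree():
--     """
--     Simple implementation of a tree data structure in python. Essentially a defaultdict of default dicts.
--
--     Usage: foo = tree() ; foo["a"]["b"]["c"]... = bar
--     """
--     return defaultdict(tree)
--
-- def dicts(t):
--     """Utility function for casting a tree to a complex dict"""
--     return {k: dicts(t[k]) for k in t}
-- ===== SOURCE B (Python) =====
-- def reduce_rtc_bursts_to_cmr_patterns(rtc_native_id_patterns_burst_sets):
--     # Four flat prefix->children tables (one per depth) instead of a nested trie,
--     # collapsed by one uniform recursive walk driven by a threshold list.
--     levels = [{}, {}, {}, {}]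
--     for p in rtc_native_id_patterns_burst_sets:
--         chain = [p[:-7], p[:-6], p[:-5], p[:-4], p]
--         for i in range(4):
--             levels[i].setdefault(chain[i], {})[chain[i + 1]] = None
--     thresholds = [10, 10, 10, 3]
--     patterns = set()
--
--     def collapse(key, lvls, ths):
--         children = lvls[0].get(key, {})
--         if len(children) == ths[0]:
--             patterns.add(key)
--         elif len(lvls) == 1:
--             patterns.update(children.keys())
--         else:
--             for c in children:
--                 collapse(c, lvls[1:], ths[1:])
--
--     for k in levels[0]:
--         collapse(k, levels, thresholds)
--     return {p + "*" for p in patterns}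
-- ===== Notes on version B (the rewrite author's own statement) =====
-- stated objective: simpler
-- what changed: Replaces the nested defaultdict trie plus four hand-unrolled nested loops with four flat prefix-to-children tables built in one pass and a single uniform recursive collapse driven by the threshold list [10, 10, 10, 3].
import Mathlib
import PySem

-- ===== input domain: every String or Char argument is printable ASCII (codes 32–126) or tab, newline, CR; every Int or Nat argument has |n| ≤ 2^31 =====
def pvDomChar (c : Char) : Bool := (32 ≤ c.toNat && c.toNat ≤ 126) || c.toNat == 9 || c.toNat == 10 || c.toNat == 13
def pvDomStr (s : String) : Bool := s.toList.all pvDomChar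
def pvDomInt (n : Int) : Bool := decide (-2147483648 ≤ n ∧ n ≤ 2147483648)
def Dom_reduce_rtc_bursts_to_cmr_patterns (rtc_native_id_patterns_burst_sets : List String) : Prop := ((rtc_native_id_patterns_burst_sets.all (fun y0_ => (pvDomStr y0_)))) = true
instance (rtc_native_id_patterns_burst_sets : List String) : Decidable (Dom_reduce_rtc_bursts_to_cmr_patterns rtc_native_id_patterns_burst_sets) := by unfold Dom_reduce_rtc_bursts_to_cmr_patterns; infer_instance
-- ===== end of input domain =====

-- B replaces A's nested defaultdict trie + four hand-unrolled nested loops by four flat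
-- prefix→children tables collapsed with one uniform recursive walk over a threshold list
-- (objective: simpler decomposition; same asymptotic cost).

-- ===== PORT A =====
-- `tree()` is a defaultdict of defaultdicts; each trie level is a PySem.Dict.
-- The `dicts()` helper only casts defaultdict→plain dict, which is the identity on PySem.Dict.
abbrev pvD0 := PySem.Dict String Unit   -- leaf level: full native-id → tree() (empty, modelled as Unit)
abbrev pvD1 := PySem.Dict String pvD0
abbrev pvD2 := PySem.Dict String pvD1
abbrev pvD3 := PySem.Dict String pvD2
abbrev pvD4 := PySem.Dict String pvD3

-- one pass of `native_id_pattern_tree[pattern[:-7]][pattern[:-6]][pattern[:-5]][pattern[:-4]][pattern]`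
-- (each defaultdict access reads the existing child or creates it, then the chain is written back)
def pvInsertA (t : pvD4) (p : String) : pvD4 :=
  let v1 := t.getD (PySem.Str.slice p none (some (-7))) PySem.Dict.empty
  let v2 := v1.getD (PySem.Str.slice p none (some (-6))) PySem.Dict.empty
  let v3 := v2.getD (PySem.Str.slice p none (some (-5))) PySem.Dict.empty
  let v4 := v3.getD (PySem.Str.slice p none (some (-4))) PySem.Dict.empty
  t.insert (PySem.Str.slice p none (some (-7)))
    (v1.insert (PySem.Str.slice p none (some (-6)))
      (v2.insert (PySem.Str.slice p none (some (-5)))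
        (v3.insert (PySem.Str.slice p none (some (-4)))
          (v4.setdefault p ()))))

def reduce_rtc_bursts_to_cmr_patterns (rtc_native_id_patterns_burst_sets : List String) : List String :=
  let t : pvD4 := rtc_native_id_patterns_burst_sets.foldl pvInsertA PySem.Dict.empty
  let out : PySem.Set String :=
    t.items.foldl (fun out kv1 =>
      if kv1.2.keys.length = 10 then PySem.Set.add out kv1.1
      else kv1.2.items.foldl (fun out kv2 =>
        if kv2.2.keys.length = 10 then PySem.Set.add out kv2.1
        else kv2.2.items.foldl (fun out kv3 =>
          if kv3.2.keys.length = 10 then PySem.Set.add out kv3.1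
          else kv3.2.items.foldl (fun out kv4 =>
            if kv4.2.keys.length = 3 then PySem.Set.add out kv4.1
            else PySem.Set.update out (PySem.Set.ofList kv4.2.keys)) out) out) out) PySem.Set.empty
  PySem.Set.ofList (out.map (fun p => p ++ "*"))

-- ===== PORT B =====
abbrev pvLevel := PySem.Dict String (PySem.Dict String Unit)

-- chain = [p[:-7], p[:-6], p[:-5], p[:-4], p]
def pvChain (p : String) : List String :=
  [PySem.Str.slice p none (some (-7)), PySem.Str.slice p none (some (-6)),
   PySem.Str.slice p none (some (-5)), PySem.Str.slice p none (some (-4)), p]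

-- `for i in range(4): levels[i].setdefault(chain[i], {})[chain[i+1]] = None`
def pvUpdLevels : List pvLevel → List String → List pvLevel
  | lv :: lvs, a :: b :: rest =>
      lv.insert a ((lv.getD a PySem.Dict.empty).insert b ()) :: pvUpdLevels lvs (b :: rest)
  | lvs, _ => lvs

mutual
  -- `collapse(key, lvls, ths)` from Source B, threaded through the `patterns` accumulator
  def pvCollapse (key : String) (lvls : List pvLevel) (ths : List Nat)
      (out : PySem.Set String) : PySem.Set String :=
    match lvls, ths with
    | lv :: lvs, th :: ths' =>
      let children := (lv.getD key PySem.Dict.empty).keys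
      if children.length = th then PySem.Set.add out key
      else if lvs.isEmpty then PySem.Set.update out children
      else pvCollapseMany children lvs ths' out
    | _, _ => out
  termination_by (lvls.length, 0)

  -- the `for c in children: collapse(c, …)` loop
  def pvCollapseMany (cs : List String) (lvls : List pvLevel) (ths : List Nat)
      (out : PySem.Set String) : PySem.Set String :=
    match cs with
    | [] => out
    | c :: cs' => pvCollapseMany cs' lvls ths (pvCollapse c lvls ths out)
  termination_by (lvls.length, cs.length + 1)
end

def reduce_rtc_bursts_to_cmr_patterns_alt (rtc_native_id_patterns_burst_sets : List String) : List String :=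
  let lvls : List pvLevel := rtc_native_id_patterns_burst_sets.foldl
    (fun lv p => pvUpdLevels lv (pvChain p))
    [PySem.Dict.empty, PySem.Dict.empty, PySem.Dict.empty, PySem.Dict.empty]
  let l0 := lvls.headD PySem.Dict.empty   -- levels[0]
  let out : PySem.Set String :=
    l0.keys.foldl (fun out k => pvCollapse k lvls [10, 10, 10, 3] out) PySem.Set.empty
  PySem.Set.ofList (out.map (fun p => p ++ "*"))

-- ===== PRECONDITION & SPEC =====
def Spec_reduce_rtc_bursts_to_cmr_patterns (rtc_native_id_patterns_burst_sets : List String) (out : List String) : Prop := out = reduce_rtc_bursts_to_cmr_patterns_alt rtc_native_id_patterns_burst_sets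
instance (rtc_native_id_patterns_burst_sets : List String) (out : List String) : Decidable (Spec_reduce_rtc_bursts_to_cmr_patterns rtc_native_id_patterns_burst_sets out) := by unfold Spec_reduce_rtc_bursts_to_cmr_patterns; infer_instance

-- ===== CLAIM (what is proved, stated in full; the proofs are below) =====
def Claim_equal_reduce_rtc_bursts_to_cmr_patterns : Prop := ∀ (rtc_native_id_patterns_burst_sets : List String), Dom_reduce_rtc_bursts_to_cmr_patterns rtc_native_id_patterns_burst_sets → Spec_reduce_rtc_bursts_to_cmr_patterns rtc_native_id_patterns_burst_sets (reduce_rtc_bursts_to_cmr_patterns rtc_native_id_patterns_burst_sets)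

-- ===== LEMMAS AND PROOFS =====

-- prefix chain helpers (abbreviations for the slice expressions both ports use)
def pvC7 (p : String) : String := PySem.Str.slice p none (some (-7))
def pvC6 (p : String) : String := PySem.Str.slice p none (some (-6))
def pvC5 (p : String) : String := PySem.Str.slice p none (some (-5))
def pvC4 (p : String) : String := PySem.Str.slice p none (some (-4))

-- `pvPar s` is s[:-1]: the parent prefix of a trie key
def pvPar (s : String) : String := String.ofList s.toList.dropLast

lemma pvPar_c6 (p : String) : pvPar (pvC6 p) = pvC7 p := by
  apply String.toList_inj.mp
  simp [pvPar, pvC6, pvC7, PySem.Str.slice]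
  rw [PySem.List.slice_to_neg_ofNat _ 6 (by norm_num), PySem.List.slice_to_neg_ofNat _ 7 (by norm_num)]
  simp [List.dropLast_eq_take, List.take_take]
  omega

lemma pvPar_c5 (p : String) : pvPar (pvC5 p) = pvC6 p := by
  apply String.toList_inj.mp
  simp [pvPar, pvC5, pvC6, PySem.Str.slice]
  rw [PySem.List.slice_to_neg_ofNat _ 5 (by norm_num), PySem.List.slice_to_neg_ofNat _ 6 (by norm_num)]
  simp [List.dropLast_eq_take, List.take_take]
  omega

lemma pvPar_c4 (p : String) : pvPar (pvC4 p) = pvC5 p := by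
  apply String.toList_inj.mp
  simp [pvPar, pvC4, pvC5, PySem.Str.slice]
  rw [PySem.List.slice_to_neg_ofNat _ 4 (by norm_num), PySem.List.slice_to_neg_ofNat _ 5 (by norm_num)]
  simp [List.dropLast_eq_take, List.take_take]
  omega

-- generic keys-only congruence for inserts into dicts with equal key lists
lemma pvKeys_insert_congr {v1 v2 : Type} (d : PySem.Dict String v1) (d' : PySem.Dict String v2)
    (k : String) (w : v1) (w' : v2) (h : d.keys = d'.keys) :
    (d.insert k w).keys = (d'.insert k w').keys := by
  by_cases hk : d.contains k = true
  · have hk' : d'.contains k = true := by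
      rw [PySem.Dict.contains_iff_mem_keys] at hk ⊢; rw [← h]; exact hk
    rw [PySem.Dict.keys_insert_of_contains _ _ hk, PySem.Dict.keys_insert_of_contains _ _ hk', h]
  · have hk' : d'.contains k = false := by
      rw [Bool.not_eq_true] at hk
      rw [← Bool.not_eq_true, PySem.Dict.contains_iff_mem_keys] at hk ⊢
      rw [← h]; exact hk
    rw [Bool.not_eq_true] at hk
    rw [PySem.Dict.keys_insert_of_not_contains _ _ hk, PySem.Dict.keys_insert_of_not_contains _ _ hk', h]

lemma pvKeys_setdefault_insert_congr {v1 v2 : Type} (d : PySem.Dict String v1) (d' : PySem.Dict String v2)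
    (k : String) (w : v1) (w' : v2) (h : d.keys = d'.keys) :
    (d.setdefault k w).keys = (d'.insert k w').keys := by
  by_cases hk : d.contains k = true
  · have hk' : d'.contains k = true := by
      rw [PySem.Dict.contains_iff_mem_keys] at hk ⊢; rw [← h]; exact hk
    rw [PySem.Dict.keys_setdefault, if_pos hk, PySem.Dict.keys_insert_of_contains _ _ hk', h]
  · have hk' : d'.contains k = false := by
      rw [Bool.not_eq_true] at hk
      rw [← Bool.not_eq_true, PySem.Dict.contains_iff_mem_keys] at hk ⊢
      rw [← h]; exact hk
    rw [Bool.not_eq_true] at hk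
    rw [PySem.Dict.keys_setdefault, if_neg (by simp [hk]), PySem.Dict.keys_insert_of_not_contains _ _ hk', h]

lemma pvNodup_setdefault {v1 : Type} (d : PySem.Dict String v1) (k : String) (w : v1)
    (h : d.keys.Nodup) : (d.setdefault k w).keys.Nodup := by
  by_cases hk : d.contains k = true
  · rw [PySem.Dict.keys_setdefault, if_pos hk]; exact h
  · rw [Bool.not_eq_true] at hk
    rw [PySem.Dict.keys_setdefault, if_neg (by simp [hk])]
    have : k ∉ d.keys := by
      rw [← PySem.Dict.contains_iff_mem_keys, hk]; simp
    simp [List.nodup_append, h]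
    intro a ha h'
    exact this (h' ▸ ha)

-- trie nodes addressed by their own key (the path is determined by pvPar)
def pvN1 (t : pvD4) (k : String) : pvD3 := t.getD k PySem.Dict.empty
def pvN2 (t : pvD4) (k : String) : pvD2 := (pvN1 t (pvPar k)).getD k PySem.Dict.empty
def pvN3 (t : pvD4) (k : String) : pvD1 := (pvN2 t (pvPar k)).getD k PySem.Dict.empty
def pvN4 (t : pvD4) (k : String) : pvD0 := (pvN3 t (pvPar k)).getD k PySem.Dict.empty

-- the subtrees written back by one pvInsertA step
def pvW4 (t : pvD4) (p : String) : pvD0 := (pvN4 t (pvC4 p)).setdefault p ()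
def pvW3 (t : pvD4) (p : String) : pvD1 := (pvN3 t (pvC5 p)).insert (pvC4 p) (pvW4 t p)
def pvW2 (t : pvD4) (p : String) : pvD2 := (pvN2 t (pvC6 p)).insert (pvC5 p) (pvW3 t p)
def pvW1 (t : pvD4) (p : String) : pvD3 := (pvN1 t (pvC7 p)).insert (pvC6 p) (pvW2 t p)

lemma pvInsertA_eq (t : pvD4) (p : String) :
    pvInsertA t p = t.insert (pvC7 p) (pvW1 t p) := by
  simp only [pvW1, pvW2, pvW3, pvW4, pvN1, pvN2, pvN3, pvN4, pvPar_c6, pvPar_c5, pvPar_c4]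
  simp only [pvInsertA, pvC7, pvC6, pvC5, pvC4]

lemma pvN1_insert (t : pvD4) (p k : String) :
    pvN1 (pvInsertA t p) k = if k = pvC7 p then pvW1 t p else pvN1 t k := by
  rw [pvInsertA_eq]
  unfold pvN1
  rw [PySem.Dict.getD_insert]

lemma pvN2_insert (t : pvD4) (p k : String) :
    pvN2 (pvInsertA t p) k = if k = pvC6 p then pvW2 t p else pvN2 t k := by
  unfold pvN2
  rw [pvN1_insert]
  by_cases h : k = pvC6 p
  · subst h
    rw [if_pos rfl, if_pos (pvPar_c6 p)]
    unfold pvW1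
    rw [PySem.Dict.getD_insert, if_pos rfl]
  · rw [if_neg h]
    by_cases hp : pvPar k = pvC7 p
    · rw [if_pos hp]
      unfold pvW1
      rw [PySem.Dict.getD_insert, if_neg h, hp]
    · rw [if_neg hp]

lemma pvN3_insert (t : pvD4) (p k : String) :
    pvN3 (pvInsertA t p) k = if k = pvC5 p then pvW3 t p else pvN3 t k := by
  unfold pvN3
  rw [pvN2_insert]
  by_cases h : k = pvC5 p
  · subst h
    rw [if_pos rfl, if_pos (pvPar_c5 p)]
    unfold pvW2
    rw [PySem.Dict.getD_insert, if_pos rfl]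
  · rw [if_neg h]
    by_cases hp : pvPar k = pvC6 p
    · rw [if_pos hp]
      unfold pvW2
      rw [PySem.Dict.getD_insert, if_neg h, hp]
    · rw [if_neg hp]

lemma pvN4_insert (t : pvD4) (p k : String) :
    pvN4 (pvInsertA t p) k = if k = pvC4 p then pvW4 t p else pvN4 t k := by
  unfold pvN4
  rw [pvN3_insert]
  by_cases h : k = pvC4 p
  · subst h
    rw [if_pos rfl, if_pos (pvPar_c4 p)]
    unfold pvW3
    rw [PySem.Dict.getD_insert, if_pos rfl]
  · rw [if_neg h]
    by_cases hp : pvPar k = pvC5 p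
    · rw [if_pos hp]
      unfold pvW3
      rw [PySem.Dict.getD_insert, if_neg h, hp]
    · rw [if_neg hp]

-- B's per-level update steps (what pvUpdLevels does at each position)
def pvSt0 (l : pvLevel) (p : String) : pvLevel :=
  l.insert (pvC7 p) ((l.getD (pvC7 p) PySem.Dict.empty).insert (pvC6 p) ())
def pvSt1 (l : pvLevel) (p : String) : pvLevel :=
  l.insert (pvC6 p) ((l.getD (pvC6 p) PySem.Dict.empty).insert (pvC5 p) ())
def pvSt2 (l : pvLevel) (p : String) : pvLevel :=
  l.insert (pvC5 p) ((l.getD (pvC5 p) PySem.Dict.empty).insert (pvC4 p) ())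
def pvSt3 (l : pvLevel) (p : String) : pvLevel :=
  l.insert (pvC4 p) ((l.getD (pvC4 p) PySem.Dict.empty).insert p ())

lemma pvUpdLevels_eq (l0 l1 l2 l3 : pvLevel) (p : String) :
    pvUpdLevels [l0, l1, l2, l3] (pvChain p) = [pvSt0 l0 p, pvSt1 l1 p, pvSt2 l2 p, pvSt3 l3 p] := by
  simp only [pvChain, pvUpdLevels, pvSt0, pvSt1, pvSt2, pvSt3, pvC7, pvC6, pvC5, pvC4]

lemma pvFold_levels (ps : List String) (l0 l1 l2 l3 : pvLevel) :
    ps.foldl (fun lv p => pvUpdLevels lv (pvChain p)) [l0, l1, l2, l3]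
      = [ps.foldl pvSt0 l0, ps.foldl pvSt1 l1, ps.foldl pvSt2 l2, ps.foldl pvSt3 l3] := by
  induction ps generalizing l0 l1 l2 l3 with
  | nil => rfl
  | cons p ps ih => simp only [List.foldl_cons, pvUpdLevels_eq, ih]

-- the coupling invariant between A's trie and B's four flat tables
structure pvInv (t : pvD4) (l0 l1 l2 l3 : pvLevel) : Prop where
  e0 : t.keys = l0.keys
  e1 : ∀ k, (pvN1 t k).keys = (l0.getD k PySem.Dict.empty).keys
  e2 : ∀ k, (pvN2 t k).keys = (l1.getD k PySem.Dict.empty).keys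
  e3 : ∀ k, (pvN3 t k).keys = (l2.getD k PySem.Dict.empty).keys
  e4 : ∀ k, (pvN4 t k).keys = (l3.getD k PySem.Dict.empty).keys
  p1 : ∀ k k', k' ∈ (pvN1 t k).keys → pvPar k' = k
  p2 : ∀ k k', k' ∈ (pvN2 t k).keys → pvPar k' = k
  p3 : ∀ k k', k' ∈ (pvN3 t k).keys → pvPar k' = k
  n0 : t.keys.Nodup
  n1 : ∀ k, (pvN1 t k).keys.Nodup
  n2 : ∀ k, (pvN2 t k).keys.Nodup
  n3 : ∀ k, (pvN3 t k).keys.Nodup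
  n4 : ∀ k, (pvN4 t k).keys.Nodup

lemma pvInv_empty : pvInv PySem.Dict.empty PySem.Dict.empty PySem.Dict.empty PySem.Dict.empty PySem.Dict.empty := by
  constructor <;>
    simp [pvN1, pvN2, pvN3, pvN4, PySem.Dict.getD_empty, PySem.Dict.keys_empty]

lemma pvInv_step (t : pvD4) (l0 l1 l2 l3 : pvLevel) (p : String) (inv : pvInv t l0 l1 l2 l3) :
    pvInv (pvInsertA t p) (pvSt0 l0 p) (pvSt1 l1 p) (pvSt2 l2 p) (pvSt3 l3 p) := by
  constructor
  · -- e0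
    rw [pvInsertA_eq, pvSt0]
    exact pvKeys_insert_congr _ _ _ _ _ inv.e0
  · -- e1
    intro k
    rw [pvN1_insert, pvSt0, PySem.Dict.getD_insert]
    by_cases h : k = pvC7 p
    · rw [if_pos h, if_pos h]
      exact pvKeys_insert_congr _ _ _ _ _ (inv.e1 _)
    · rw [if_neg h, if_neg h]; exact inv.e1 k
  · -- e2
    intro k
    rw [pvN2_insert, pvSt1, PySem.Dict.getD_insert]
    by_cases h : k = pvC6 p
    · rw [if_pos h, if_pos h]
      exact pvKeys_insert_congr _ _ _ _ _ (inv.e2 _)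
    · rw [if_neg h, if_neg h]; exact inv.e2 k
  · -- e3
    intro k
    rw [pvN3_insert, pvSt2, PySem.Dict.getD_insert]
    by_cases h : k = pvC5 p
    · rw [if_pos h, if_pos h]
      exact pvKeys_insert_congr _ _ _ _ _ (inv.e3 _)
    · rw [if_neg h, if_neg h]; exact inv.e3 k
  · -- e4
    intro k
    rw [pvN4_insert, pvSt3, PySem.Dict.getD_insert]
    by_cases h : k = pvC4 p
    · rw [if_pos h, if_pos h]
      exact pvKeys_setdefault_insert_congr _ _ _ _ _ (inv.e4 _)
    · rw [if_neg h, if_neg h]; exact inv.e4 k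
  · -- p1
    intro k k' hk'
    rw [pvN1_insert] at hk'
    by_cases h : k = pvC7 p
    · rw [if_pos h] at hk'
      unfold pvW1 at hk'
      rcases (PySem.Dict.mem_keys_insert _ _ _ _).mp hk' with h6 | hmem
      · subst h6; rw [pvPar_c6, h]
      · rw [h]; exact inv.p1 _ _ hmem
    · rw [if_neg h] at hk'; exact inv.p1 _ _ hk'
  · -- p2
    intro k k' hk'
    rw [pvN2_insert] at hk'
    by_cases h : k = pvC6 p
    · rw [if_pos h] at hk'
      unfold pvW2 at hk'
      rcases (PySem.Dict.mem_keys_insert _ _ _ _).mp hk' with h5 | hmem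
      · subst h5; rw [pvPar_c5, h]
      · rw [h]; exact inv.p2 _ _ hmem
    · rw [if_neg h] at hk'; exact inv.p2 _ _ hk'
  · -- p3
    intro k k' hk'
    rw [pvN3_insert] at hk'
    by_cases h : k = pvC5 p
    · rw [if_pos h] at hk'
      unfold pvW3 at hk'
      rcases (PySem.Dict.mem_keys_insert _ _ _ _).mp hk' with h4 | hmem
      · subst h4; rw [pvPar_c4, h]
      · rw [h]; exact inv.p3 _ _ hmem
    · rw [if_neg h] at hk'; exact inv.p3 _ _ hk'
  · -- n0
    rw [pvInsertA_eq]
    exact PySem.Dict.nodup_keys_insert _ _ _ inv.n0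
  · -- n1
    intro k
    rw [pvN1_insert]
    by_cases h : k = pvC7 p
    · rw [if_pos h]; exact PySem.Dict.nodup_keys_insert _ _ _ (inv.n1 _)
    · rw [if_neg h]; exact inv.n1 k
  · -- n2
    intro k
    rw [pvN2_insert]
    by_cases h : k = pvC6 p
    · rw [if_pos h]; exact PySem.Dict.nodup_keys_insert _ _ _ (inv.n2 _)
    · rw [if_neg h]; exact inv.n2 k
  · -- n3
    intro k
    rw [pvN3_insert]
    by_cases h : k = pvC5 p
    · rw [if_pos h]; exact PySem.Dict.nodup_keys_insert _ _ _ (inv.n3 _)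
    · rw [if_neg h]; exact inv.n3 k
  · -- n4
    intro k
    rw [pvN4_insert]
    by_cases h : k = pvC4 p
    · rw [if_pos h]; exact pvNodup_setdefault _ _ _ (inv.n4 _)
    · rw [if_neg h]; exact inv.n4 k

lemma pvInv_fold (ps : List String) (t : pvD4) (l0 l1 l2 l3 : pvLevel)
    (inv : pvInv t l0 l1 l2 l3) :
    pvInv (ps.foldl pvInsertA t) (ps.foldl pvSt0 l0) (ps.foldl pvSt1 l1)
      (ps.foldl pvSt2 l2) (ps.foldl pvSt3 l3) := by
  induction ps generalizing t l0 l1 l2 l3 with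
  | nil => exact inv
  | cons p ps ih => exact ih _ _ _ _ _ (pvInv_step _ _ _ _ _ p inv)

-- A's four loop bodies, named
def pvA4 (out : PySem.Set String) (kv : String × pvD0) : PySem.Set String :=
  if kv.2.keys.length = 3 then PySem.Set.add out kv.1
  else PySem.Set.update out (PySem.Set.ofList kv.2.keys)
def pvA3 (out : PySem.Set String) (kv : String × pvD1) : PySem.Set String :=
  if kv.2.keys.length = 10 then PySem.Set.add out kv.1
  else kv.2.items.foldl pvA4 out
def pvA2 (out : PySem.Set String) (kv : String × pvD2) : PySem.Set String :=
  if kv.2.keys.length = 10 then PySem.Set.add out kv.1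
  else kv.2.items.foldl pvA3 out
def pvA1 (out : PySem.Set String) (kv : String × pvD3) : PySem.Set String :=
  if kv.2.keys.length = 10 then PySem.Set.add out kv.1
  else kv.2.items.foldl pvA2 out

lemma pvPortA_eq (ps : List String) :
    reduce_rtc_bursts_to_cmr_patterns ps
      = PySem.Set.ofList (((ps.foldl pvInsertA PySem.Dict.empty).items.foldl pvA1 PySem.Set.empty).map (fun p => p ++ "*")) := rfl

lemma pvCollapseMany_eq_foldl (cs : List String) (lvls : List pvLevel) (ths : List Nat)
    (out : PySem.Set String) :
    pvCollapseMany cs lvls ths out = cs.foldl (fun o c => pvCollapse c lvls ths o) out := by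
  induction cs generalizing out with
  | nil => rw [pvCollapseMany]; rfl
  | cons c cs ih => rw [pvCollapseMany]; simp only [List.foldl_cons, ih]

lemma pvS4 {t : pvD4} {l0 l1 l2 l3 : pvLevel} (inv : pvInv t l0 l1 l2 l3)
    (k : String) (out : PySem.Set String) :
    pvCollapse k [l3] [3] out = pvA4 out (k, pvN4 t k) := by
  rw [pvCollapse]
  simp only [pvA4, ← inv.e4 k, List.isEmpty_nil, if_true]
  rw [PySem.Set.ofList_eq_self_of_nodup _ (inv.n4 k)]

lemma pvS3 {t : pvD4} {l0 l1 l2 l3 : pvLevel} (inv : pvInv t l0 l1 l2 l3)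
    (k : String) (out : PySem.Set String) :
    pvCollapse k [l2, l3] [10, 3] out = pvA3 out (k, pvN3 t k) := by
  rw [pvCollapse]
  simp only [pvA3, ← inv.e3 k, List.isEmpty_cons]
  by_cases h : (pvN3 t k).keys.length = 10
  · rw [if_pos h, if_pos h]
  · rw [if_neg h, if_neg h, if_neg (by simp)]
    rw [pvCollapseMany_eq_foldl]
    rw [PySem.Dict.items_eq_map_keys _ (inv.n3 k) PySem.Dict.empty, List.foldl_map]
    apply PySem.List.foldl_congr_mem
    intro acc c hc
    rw [pvS4 inv c acc]
    have hpar : pvPar c = k := inv.p3 k c hc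
    unfold pvN4
    rw [hpar]

lemma pvS2 {t : pvD4} {l0 l1 l2 l3 : pvLevel} (inv : pvInv t l0 l1 l2 l3)
    (k : String) (out : PySem.Set String) :
    pvCollapse k [l1, l2, l3] [10, 10, 3] out = pvA2 out (k, pvN2 t k) := by
  rw [pvCollapse]
  simp only [pvA2, ← inv.e2 k, List.isEmpty_cons]
  by_cases h : (pvN2 t k).keys.length = 10
  · rw [if_pos h, if_pos h]
  · rw [if_neg h, if_neg h, if_neg (by simp)]
    rw [pvCollapseMany_eq_foldl]
    rw [PySem.Dict.items_eq_map_keys _ (inv.n2 k) PySem.Dict.empty, List.foldl_map]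
    apply PySem.List.foldl_congr_mem
    intro acc c hc
    rw [pvS3 inv c acc]
    have hpar : pvPar c = k := inv.p2 k c hc
    unfold pvN3
    rw [hpar]

lemma pvS1 {t : pvD4} {l0 l1 l2 l3 : pvLevel} (inv : pvInv t l0 l1 l2 l3)
    (k : String) (out : PySem.Set String) :
    pvCollapse k [l0, l1, l2, l3] [10, 10, 10, 3] out = pvA1 out (k, pvN1 t k) := by
  rw [pvCollapse]
  simp only [pvA1, ← inv.e1 k, List.isEmpty_cons]
  by_cases h : (pvN1 t k).keys.length = 10
  · rw [if_pos h, if_pos h]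
  · rw [if_neg h, if_neg h, if_neg (by simp)]
    rw [pvCollapseMany_eq_foldl]
    rw [PySem.Dict.items_eq_map_keys _ (inv.n1 k) PySem.Dict.empty, List.foldl_map]
    apply PySem.List.foldl_congr_mem
    intro acc c hc
    rw [pvS2 inv c acc]
    have hpar : pvPar c = k := inv.p1 k c hc
    unfold pvN2
    rw [hpar]

lemma pvOut_eq {t : pvD4} {l0 l1 l2 l3 : pvLevel} (inv : pvInv t l0 l1 l2 l3) :
    t.items.foldl pvA1 PySem.Set.empty
      = l0.keys.foldl (fun o k => pvCollapse k [l0, l1, l2, l3] [10, 10, 10, 3] o) PySem.Set.empty := by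
  rw [← inv.e0]
  rw [PySem.Dict.items_eq_map_keys _ inv.n0 PySem.Dict.empty, List.foldl_map]
  apply PySem.List.foldl_congr_mem
  intro acc k _
  rw [pvS1 inv k acc]
  rfl

-- ===== VERDICT (by name: the statement is the Claim_ definition above) =====
theorem reduce_rtc_bursts_to_cmr_patterns_spec : Claim_equal_reduce_rtc_bursts_to_cmr_patterns := by
  intro ps _dom
  unfold Spec_reduce_rtc_bursts_to_cmr_patterns
  rw [pvPortA_eq]
  show _ = reduce_rtc_bursts_to_cmr_patterns_alt ps
  unfold reduce_rtc_bursts_to_cmr_patterns_alt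
  rw [pvFold_levels]
  simp only [List.headD_cons]
  have inv := pvInv_fold ps _ _ _ _ _ pvInv_empty
  rw [pvOut_eq inv]
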